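-- pv_equiv track=rewrite | github.com/freemjstudio/algo_weekly_challenge | week13/김주성/[프로그래머스] 광물 캐기.py | mining
-- ===== SOURCE A (Python) =====
-- def mining(i, m, t):
--     for j in range(len(m)):
--         if i == 0:
--             t += 1
--         elif i == 1:
--             if m[j] == 'diamond':
--                 t += 5
--             else:
--                 t += 1
--         else:
--             if m[j] == 'diamond':
--                 t += 25
--             elif m[j] == 'iron':
--                 t += 5
--             else:
--                 t += 1
--     return t
-- ===== SOURCE B (Python) =====
-- def mining(i, m, t):
--     d = m.count('diamond')
--     r = m.count('iron')
--     n = len(m)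
--     if i == 0:
--         return t + n
--     if i == 1:
--         return t + n + 4 * d
--     return t + n + 24 * d + 4 * r
-- ===== Notes on version B (the rewrite author's own statement) =====
-- stated objective: simpler
-- what changed: Replaced A's per-element conditional loop by counting 'diamond' and 'iron' once (C-level list.count) and computing the fatigue in closed form per pickaxe tier.
import Mathlib
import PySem

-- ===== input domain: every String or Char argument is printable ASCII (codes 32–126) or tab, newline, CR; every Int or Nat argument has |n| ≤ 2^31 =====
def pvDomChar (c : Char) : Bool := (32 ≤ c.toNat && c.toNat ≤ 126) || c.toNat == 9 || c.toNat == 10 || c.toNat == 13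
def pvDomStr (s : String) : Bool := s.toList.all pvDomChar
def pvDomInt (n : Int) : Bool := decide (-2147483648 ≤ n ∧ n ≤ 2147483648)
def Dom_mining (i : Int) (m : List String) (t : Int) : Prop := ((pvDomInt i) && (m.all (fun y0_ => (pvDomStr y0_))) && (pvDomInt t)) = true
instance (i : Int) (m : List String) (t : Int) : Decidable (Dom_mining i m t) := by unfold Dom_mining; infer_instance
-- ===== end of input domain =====

-- B counts 'diamond'/'iron' once and computes the fatigue in closed form per tier; A branches per element.

-- ===== PORT A =====
-- A: for j in range(len(m)): branch on i then on m[j], accumulating into t.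
def mining (i : Int) (m : List String) (t : Int) : Int :=
  m.foldl (fun t mj =>
    if i == 0 then t + 1
    else if i == 1 then
      if mj == "diamond" then t + 5 else t + 1
    else
      if mj == "diamond" then t + 25
      else if mj == "iron" then t + 5
      else t + 1) t

-- ===== PORT B =====
def mining_alt (i : Int) (m : List String) (t : Int) : Int :=
  let d : Int := (PySem.List.count m "diamond" : Int)
  let r : Int := (PySem.List.count m "iron" : Int)
  let n : Int := (m.length : Int)
  if i == 0 then t + n
  else if i == 1 then t + n + 4 * d
  else t + n + 24 * d + 4 * r

-- ===== PRECONDITION & SPEC =====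
def Spec_mining (i : Int) (m : List String) (t : Int) (out : Int) : Prop := out = mining_alt i m t
instance (i : Int) (m : List String) (t : Int) (out : Int) : Decidable (Spec_mining i m t out) := by unfold Spec_mining; infer_instance

-- ===== CLAIM (what is proved, stated in full; the proofs are below) =====
def Claim_equal_mining : Prop := ∀ (i : Int) (m : List String) (t : Int), Dom_mining i m t → Spec_mining i m t (mining i m t)

-- ===== LEMMAS AND PROOFS =====
theorem mining_eq_alt (i : Int) (m : List String) (t : Int) :
    mining i m t = mining_alt i m t := by
  induction m generalizing t with
  | nil => simp [mining, mining_alt, PySem.List.count]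
  | cons hd tl ih =>
    have htl := fun t => ih t
    simp only [mining, List.foldl_cons] at *
    by_cases h0 : i = 0
    · simp [mining_alt, h0] at htl ⊢
      rw [htl (t+1)]; omega
    · by_cases h1 : i = 1
      · by_cases hd_d : hd = "diamond" <;>
          simp_all [mining, mining_alt, PySem.List.count] <;> omega
      · by_cases hd_d : hd = "diamond"
        · simp_all [mining, mining_alt, PySem.List.count]; omega
        · by_cases hd_i : hd = "iron" <;>
            simp_all [mining, mining_alt, PySem.List.count] <;> omega

-- ===== VERDICT (by name: the statement is the Claim_ definition above) =====
theorem mining_spec : Claim_equal_mining := by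
  intro i m t _
  unfold Spec_mining
  exact mining_eq_alt i m t
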